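-- pv_equiv track=rewrite | github.com/984-ISHU/kactl-python | content/strings/Hashing.py | getHashes
-- ===== SOURCE A (Python) =====
-- MOD = 2**61 - 1  # Large prime for hashing
--
-- C = 10**11 + 3   # Base for hashing
--
-- def getHashes(s, length):
--     if len(s) < length:
--         return []
--     h = 0
--     pw = 1
--     for i in range(length):
--         h = (h * C + ord(s[i])) % MOD
--         pw = (pw * C) % MOD
--     ret = [h]
--     for i in range(length, len(s)):
--         h = (h * C + ord(s[i]) - pw * ord(s[i - length])) % MOD
--         ret.append(h)
--     return ret
-- ===== SOURCE B (Python) =====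
-- MOD = 2**61 - 1  # Large prime for hashing
--
-- C = 10**11 + 3   # Base for hashing
--
-- def getHashes(s, length):
--     if len(s) < length:
--         return []
--     # prefix polynomial hashes: P[j] = hash of s[:j]
--     P = [0]
--     h = 0
--     for ch in s:
--         h = (h * C + ord(ch)) % MOD
--         P.append(h)
--     pw = pow(C, length, MOD)
--     return [(P[i + length] - P[i] * pw) % MOD for i in range(len(s) - length + 1)]
-- ===== Notes on version B (the rewrite author's own statement) =====
-- stated objective: alternative
-- what changed: B precomputes a prefix polynomial-hash table P and C^length mod MOD once, then reads each window hash off the table as (P[i+length]-P[i]*pw) % MOD, instead of A's single rolling value updated in place across the string.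
import Mathlib
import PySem

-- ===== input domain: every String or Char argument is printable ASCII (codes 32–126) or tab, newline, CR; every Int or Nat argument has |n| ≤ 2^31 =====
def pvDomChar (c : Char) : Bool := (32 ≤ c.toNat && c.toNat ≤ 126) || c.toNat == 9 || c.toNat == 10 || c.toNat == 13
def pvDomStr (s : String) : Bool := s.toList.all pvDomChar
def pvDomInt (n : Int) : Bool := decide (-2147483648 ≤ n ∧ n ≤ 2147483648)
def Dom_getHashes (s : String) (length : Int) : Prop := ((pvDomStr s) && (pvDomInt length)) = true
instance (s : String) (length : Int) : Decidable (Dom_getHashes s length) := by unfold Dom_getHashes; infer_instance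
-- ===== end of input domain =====

-- B computes each window hash from a precomputed prefix-hash table instead of A's rolling update; same O(n) cost, alternative decomposition.

def hashMOD : Int := 2^61 - 1  -- MOD = 2**61 - 1

def hashC : Int := 10^11 + 3   -- C = 10**11 + 3

-- ===== PORT A =====
def getHashes (s : String) (length : Int) : List Int :=
  let cs := s.toList
  if PySem.Str.len s < length then []
  else
    let p :=
      (PySem.List.pyRange 0 length 1).foldl
        (fun (hp : Int × Int) i =>
          (PySem.Int.mod (hp.1 * hashC + ((PySem.List.pyGetD cs i ' ').toNat : Int)) hashMOD,
           PySem.Int.mod (hp.2 * hashC) hashMOD))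
        (0, 1)
    let r :=
      (PySem.List.pyRange length (PySem.Str.len s) 1).foldl
        (fun (hr : Int × List Int) i =>
          let h := PySem.Int.mod
              (hr.1 * hashC + ((PySem.List.pyGetD cs i ' ').toNat : Int)
                - p.2 * ((PySem.List.pyGetD cs (i - length) ' ').toNat : Int)) hashMOD
          (h, hr.2 ++ [h]))
        (p.1, [p.1])
    r.2

-- ===== PORT B =====
def getHashes_alt (s : String) (length : Int) : List Int :=
  let cs := s.toList
  if PySem.Str.len s < length then []
  else
    let P := List.scanl (fun h ch => PySem.Int.mod (h * hashC + (ch.toNat : Int)) hashMOD) 0 cs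
    let pw := PySem.Int.powMod hashC length.toNat hashMOD
    (PySem.List.pyRange 0 (PySem.Str.len s - length + 1) 1).map
      (fun i => PySem.Int.mod
        (PySem.List.pyGetD P (i + length) 0 - PySem.List.pyGetD P i 0 * pw) hashMOD)

-- ===== PRECONDITION & SPEC =====
-- Pre_ excludes negative length, on which A always raises IndexError (its second loop
-- runs over range(length, len(s)) and indexes the string out of range); A returns
-- normally on every length ≥ 0.
def Pre_getHashes (s : String) (length : Int) : Prop := 0 ≤ length
instance (s : String) (length : Int) : Decidable (Pre_getHashes s length) := by
  unfold Pre_getHashes; infer_instance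

def pvWitness_getHashes : String × Int := ("abc", 2)

def Spec_getHashes (s : String) (length : Int) (out : List Int) : Prop := out = getHashes_alt s length
instance (s : String) (length : Int) (out : List Int) : Decidable (Spec_getHashes s length out) := by unfold Spec_getHashes; infer_instance

-- ===== CLAIM (what is proved, stated in full; the proofs are below) =====
def Claim_equal_getHashes : Prop := ∀ (s : String) (length : Int), Dom_getHashes s length → Pre_getHashes s length → Spec_getHashes s length (getHashes s length)

-- ===== LEMMAS AND PROOFS =====

-- polynomial hash of a list of characters, no reduction
def pH (l : List Char) : Int := l.foldl (fun h c => h * hashC + (c.toNat : Int)) 0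

-- canonical window hash: hash of the length-L window starting at j, reduced mod hashMOD
def fWin (cs : List Char) (L j : Nat) : Int := pH ((cs.drop j).take L) % hashMOD

lemma hM_pos : (0:Int) < hashMOD := by norm_num [hashMOD]

lemma foldl_pure (l : List Char) (x : Int) :
    l.foldl (fun h c => h * hashC + (c.toNat : Int)) x = x * hashC ^ l.length + pH l := by
  induction l generalizing x with
  | nil => simp [pH]
  | cons c t ih =>
    simp only [List.foldl_cons, List.length_cons]
    rw [ih]
    have : pH (c :: t) = (0 * hashC + (c.toNat : Int)) * hashC ^ t.length + pH t := by
      simpa [pH] using ih (0 * hashC + (c.toNat : Int))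
    rw [this]; ring

lemma pH_append (a b : List Char) :
    pH (a ++ b) = pH a * hashC ^ b.length + pH b := by
  simp only [pH, List.foldl_append]
  exact foldl_pure b _

lemma emod_step (a c : Int) :
    ((a % hashMOD) * hashC + c) % hashMOD = (a * hashC + c) % hashMOD := by
  have h1 : Int.ModEq hashMOD (a % hashMOD) a := Int.emod_emod_of_dvd a dvd_rfl
  exact (h1.mul_right hashC).add_right c

lemma emod_mul (a : Int) :
    ((a % hashMOD) * hashC) % hashMOD = (a * hashC) % hashMOD := by
  have h1 : Int.ModEq hashMOD (a % hashMOD) a := Int.emod_emod_of_dvd a dvd_rfl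
  exact h1.mul_right hashC

lemma emod_roll (a b c2 c1 : Int) :
    ((a % hashMOD) * hashC + c2 - (b % hashMOD) * c1) % hashMOD
      = (a * hashC + c2 - b * c1) % hashMOD := by
  have h1 : Int.ModEq hashMOD (a % hashMOD) a := Int.emod_emod_of_dvd a dvd_rfl
  have h2 : Int.ModEq hashMOD (b % hashMOD) b := Int.emod_emod_of_dvd b dvd_rfl
  exact ((h1.mul_right hashC).add_right c2).sub (h2.mul_right c1)

lemma emod_diff (a b c : Int) :
    (a % hashMOD - (b % hashMOD) * (c % hashMOD)) % hashMOD = (a - b * c) % hashMOD := by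
  have h1 : Int.ModEq hashMOD (a % hashMOD) a := Int.emod_emod_of_dvd a dvd_rfl
  have h2 : Int.ModEq hashMOD (b % hashMOD) b := Int.emod_emod_of_dvd b dvd_rfl
  have h3 : Int.ModEq hashMOD (c % hashMOD) c := Int.emod_emod_of_dvd c dvd_rfl
  exact h1.sub (h2.mul h3)

-- the mod-reducing fold computes the reduction of the pure fold
lemma foldl_modstep (l : List Char) (x : Int) :
    l.foldl (fun h c => (h * hashC + (c.toNat : Int)) % hashMOD) (x % hashMOD)
      = (x * hashC ^ l.length + pH l) % hashMOD := by
  induction l generalizing x with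
  | nil => simp [pH]
  | cons c t ih =>
    simp only [List.foldl_cons, List.length_cons]
    rw [emod_step, ih (x * hashC + (c.toNat : Int))]
    have : pH (c :: t) = (0 * hashC + (c.toNat : Int)) * hashC ^ t.length + pH t := by
      simpa [pH] using foldl_pure t (0 * hashC + (c.toNat : Int))
    rw [this]; ring_nf

lemma foldl_pwstep (l : List Int) (x : Int) :
    l.foldl (fun p (_ : Int) => (p * hashC) % hashMOD) (x % hashMOD)
      = (x * hashC ^ l.length) % hashMOD := by
  induction l generalizing x with
  | nil => simp
  | cons i t ih =>
    simp only [List.foldl_cons, List.length_cons]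
    rw [emod_mul, ih (x * hashC)]
    ring_nf

-- rolling identity: shifting the window by one, exactly over Int
lemma pH_roll (cs : List Char) (L m : Nat) (h : L + m < cs.length) :
    pH ((cs.drop m).take L) * hashC + ((cs.getD (L + m) ' ').toNat : Int)
      - hashC ^ L * ((cs.getD m ' ').toNat : Int)
      = pH ((cs.drop (m + 1)).take L) := by
  cases L with
  | zero => simp [pH]
  | succ k =>
    have hm : m < cs.length := by omega
    have hdrop : cs.drop m = cs[m] :: cs.drop (m + 1) := List.drop_eq_getElem_cons hm
    have hlen3 : (cs.drop (m + 1)).length = cs.length - (m + 1) := List.length_drop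
    have hlt : k < (cs.drop (m + 1)).length := by omega
    have ht : ((cs.drop (m + 1)).take k).length = k :=
      List.length_take_of_le (by omega)
    have htake : (cs.drop (m + 1)).take (k + 1)
        = (cs.drop (m + 1)).take k ++ [(cs.drop (m + 1))[k]] := by
      rw [List.take_add_one]
      simp [List.getElem?_eq_getElem hlt]
    have hget : (cs.drop (m + 1))[k] = cs.getD (k + 1 + m) ' ' := by
      have h2 : (cs.drop (m + 1))[k] = cs[m + 1 + k]'(by omega) := by
        simp
      rw [h2, List.getD_eq_getElem cs ' ' (by omega)]
      congr 1; omega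
    have hcons : pH (cs[m] :: (cs.drop (m + 1)).take k)
        = ((cs[m].toNat : Int)) * hashC ^ k + pH ((cs.drop (m + 1)).take k) := by
      have h4 := foldl_pure ((cs.drop (m + 1)).take k) (0 * hashC + (cs[m].toNat : Int))
      simp only [pH, List.foldl_cons] at h4 ⊢
      rw [h4, ht]; ring
    have hgm : cs.getD m ' ' = cs[m] := List.getD_eq_getElem cs ' ' hm
    rw [hdrop]
    show pH (cs[m] :: (cs.drop (m+1)).take k) * hashC + _ - _ = _
    rw [htake, pH_append, hcons, hget, hgm]
    simp only [pH, List.foldl_cons, List.foldl_nil, List.length_cons, List.length_nil]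
    ring

-- prefix-hash splitting, exactly over Int
lemma pH_take_add (cs : List Char) (k L : Nat) (h : k + L ≤ cs.length) :
    pH (cs.take (k + L)) = pH (cs.take k) * hashC ^ L + pH ((cs.drop k).take L) := by
  have hlen : ((cs.drop k).take L).length = L :=
    List.length_take_of_le (by rw [List.length_drop]; omega)
  rw [List.take_add, pH_append, hlen]

-- A's second loop, characterised
lemma loopA (cs : List Char) (L m : Nat) (hm : L + m ≤ cs.length) :
    (PySem.List.pyRange (L : Int) ((L : Int) + (m : Int)) 1).foldl
      (fun (hr : Int × List Int) i =>
        let h := (hr.1 * hashC + ((PySem.List.pyGetD cs i ' ').toNat : Int)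
          - (hashC ^ L % hashMOD) * ((PySem.List.pyGetD cs (i - (L : Int)) ' ').toNat : Int)) % hashMOD
        (h, hr.2 ++ [h]))
      (fWin cs L 0, [fWin cs L 0])
    = (fWin cs L m, (List.range (m + 1)).map (fWin cs L)) := by
  induction m with
  | zero => simp [PySem.List.pyRange_one_eq_nil (le_refl _), List.range_succ]
  | succ m ih =>
    have hm' : L + m ≤ cs.length := by omega
    have hsplit : PySem.List.pyRange (L : Int) ((L : Int) + ((m + 1 : Nat) : Int)) 1
        = PySem.List.pyRange (L : Int) ((L : Int) + (m : Int)) 1 ++ [(L : Int) + (m : Int)] := by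
      have h5 : ((L : Int) + ((m + 1 : Nat) : Int)) = ((L : Int) + (m : Int)) + 1 := by push_cast; ring
      rw [h5, PySem.List.pyRange_one_succ_right (by omega)]
    rw [hsplit, List.foldl_append, ih hm']
    simp only [List.foldl_cons, List.foldl_nil]
    have hidx : ((L : Int) + (m : Int)) = ((L + m : Nat) : Int) := by push_cast; ring
    have hLm : L + m < cs.length := by omega
    have hidx2' : ((L + m : Nat) : Int) - (L : Int) = ((m : Nat) : Int) := by push_cast; ring
    have hnew : (fWin cs L m * hashC + ((PySem.List.pyGetD cs ((L : Int) + (m : Int)) ' ').toNat : Int)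
        - (hashC ^ L % hashMOD) * ((PySem.List.pyGetD cs ((L : Int) + (m : Int) - (L : Int)) ' ').toNat : Int)) % hashMOD
        = fWin cs L (m + 1) := by
      rw [hidx, hidx2', PySem.List.pyGetD_natCast, PySem.List.pyGetD_natCast]
      show (pH ((cs.drop m).take L) % hashMOD * hashC + _ - _) % hashMOD = _
      rw [emod_roll, pH_roll cs L m hLm]
      rfl
    simp only [hnew]
    rw [List.range_succ (n := m + 1), List.map_append]
    rfl

-- indexing into B's scanl prefix table
lemma scanl_getD (cs : List Char) (x : Int) (j : Nat) (hj : j ≤ cs.length) :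
    (List.scanl (fun h c => (h * hashC + (c.toNat : Int)) % hashMOD) x cs).getD j 0
      = (cs.take j).foldl (fun h c => (h * hashC + (c.toNat : Int)) % hashMOD) x := by
  induction cs generalizing x j with
  | nil =>
    have : j = 0 := by simpa using hj
    simp [this]
  | cons c t ih =>
    cases j with
    | zero => simp
    | succ j =>
      simp only [List.scanl_cons, List.take_succ_cons, List.foldl_cons, List.getD_cons_succ]
      exact ih ((x * hashC + (c.toNat : Int)) % hashMOD) j (by simpa using hj)

lemma prefix_getD (cs : List Char) (j : Nat) (hj : j ≤ cs.length) :
    (List.scanl (fun h c => (h * hashC + (c.toNat : Int)) % hashMOD) 0 cs).getD j 0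
      = pH (cs.take j) % hashMOD := by
  rw [scanl_getD cs 0 j hj]
  have h0 : (0 : Int) = 0 % hashMOD := by simp
  rw [h0, foldl_modstep]
  simp

-- ===== VERDICT (by name: the statement is the Claim_ definition above) =====
theorem getHashes_spec : Claim_equal_getHashes := by
  intro s len _ hpre
  unfold Spec_getHashes getHashes getHashes_alt
  by_cases hlt : PySem.Str.len s < len
  · have hlt' : ((s.length : Nat) : Int) < len := by simpa using hlt
    simp [hlt']
  · simp only [if_neg hlt]
    obtain ⟨L, rfl⟩ : ∃ L : Nat, len = (L : Int) := ⟨len.toNat, (Int.toNat_of_nonneg hpre).symm⟩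
    set cs := s.toList with hcs
    have hsl : PySem.Str.len s = (cs.length : Int) := PySem.Str.len_eq s
    have hLn : L ≤ cs.length := by rw [hsl] at hlt; exact_mod_cast not_lt.mp hlt
    have hmodrw : ∀ a : Int, PySem.Int.mod a hashMOD = a % hashMOD :=
      fun a => PySem.Int.mod_eq_emod_of_pos hM_pos
    simp only [hmodrw,
      PySem.List.foldl_prod_mk
        (fun (a : Int) (i : Int) => (a * hashC + ((PySem.List.pyGetD cs i ' ').toNat : Int)) % hashMOD)
        (fun (b : Int) (_ : Int) => (b * hashC) % hashMOD)]
    -- A's first loop: hash of the first window and C^L, both reduced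
    have hA1 : (PySem.List.pyRange 0 (L : Int) 1).foldl
        (fun (a : Int) (i : Int) => (a * hashC + ((PySem.List.pyGetD cs i ' ').toNat : Int)) % hashMOD) 0
        = pH (cs.take L) % hashMOD := by
      have hrg : PySem.List.pyRange 0 (L : Int) 1
          = PySem.List.pyRange 0 (PySem.List.len (cs.take L)) 1 := by
        rw [PySem.List.len_eq, List.length_take_of_le hLn]
      rw [hrg]
      rw [PySem.List.foldl_congr_mem _ _
        (fun (a : Int) (i : Int) => (a * hashC + ((PySem.List.pyGetD (cs.take L) i ' ').toNat : Int)) % hashMOD) _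
        (by
          intro acc i hi
          show (acc * hashC + ((PySem.List.pyGetD cs i ' ').toNat : Int)) % hashMOD
            = (acc * hashC + ((PySem.List.pyGetD (cs.take L) i ' ').toNat : Int)) % hashMOD
          rw [PySem.List.len_eq] at hi
          obtain ⟨h0, h1⟩ := PySem.List.mem_pyRange_one.mp hi
          have hiL : i < ((cs.take L).length : Int) := h1
          have hiL' : i < (cs.length : Int) := by
            rw [List.length_take_of_le hLn] at hiL
            exact lt_of_lt_of_le hiL (by exact_mod_cast hLn)
          rw [PySem.List.pyGetD_eq_getElem cs ' ' h0 hiL',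
              PySem.List.pyGetD_eq_getElem (cs.take L) ' ' h0 hiL,
              List.getElem_take])]
      rw [PySem.List.foldl_pyRange_zero_pyGetD (cs.take L) ' '
        (fun (a : Int) (c : Char) => (a * hashC + (c.toNat : Int)) % hashMOD) 0]
      have h0 : (0 : Int) = 0 % hashMOD := by simp
      rw [h0, foldl_modstep]
      simp
    have hA2 : (PySem.List.pyRange 0 (L : Int) 1).foldl
        (fun (b : Int) (_ : Int) => (b * hashC) % hashMOD) 1
        = hashC ^ L % hashMOD := by
      have h1 : (1 : Int) % hashMOD = 1 :=
        Int.emod_eq_of_lt (by norm_num) (by norm_num [hashMOD])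
      have h2 := foldl_pwstep (PySem.List.pyRange 0 (L : Int) 1) 1
      rw [h1] at h2
      rw [h2]
      simp [PySem.List.length_pyRange_one]
    rw [hA1, hA2]
    -- A's second loop
    have hrange2 : PySem.Str.len s = (L : Int) + ((cs.length - L : Nat) : Int) := by
      rw [hsl]; omega
    have hw0 : pH (cs.take L) % hashMOD = fWin cs L 0 := by simp [fWin]
    rw [hrange2, hw0, loopA cs L (cs.length - L) (by omega)]
    -- B's side
    have hpw : PySem.Int.powMod hashC ((L : Int)).toNat hashMOD = hashC ^ L % hashMOD := by
      simp [PySem.Int.powMod, hmodrw]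
    have hrngB : ((L : Int) + ((cs.length - L : Nat) : Int)) - (L : Int) + 1
        = ((cs.length - L + 1 : Nat) : Int) := by push_cast; ring
    rw [hpw, hrngB, PySem.List.pyRange_zero_natCast, List.map_map]
    show List.map (fWin cs L) (List.range (cs.length - L + 1)) = _
    refine (List.map_congr_left ?_).symm
    intro k hk
    have hkL : k + L ≤ cs.length := by
      have := List.mem_range.mp hk; omega
    show ((PySem.List.pyGetD _ ((k : Int) + (L : Int)) 0 - PySem.List.pyGetD _ (k : Int) 0 * (hashC ^ L % hashMOD)) % hashMOD) = fWin cs L k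
    have hcast : ((k : Int) + (L : Int)) = ((k + L : Nat) : Int) := by push_cast; ring
    rw [hcast, PySem.List.pyGetD_natCast, PySem.List.pyGetD_natCast,
        prefix_getD cs (k + L) hkL, prefix_getD cs k (by omega),
        emod_diff, pH_take_add cs k L hkL]
    have : pH (cs.take k) * hashC ^ L + pH ((cs.drop k).take L) - pH (cs.take k) * hashC ^ L
        = pH ((cs.drop k).take L) := by ring
    rw [this]
    rfl
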